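-- pv_equiv track=rewrite | github.com/Triwix/DomainWildcard | app/patterns.py | iter_expanded_pattern
-- ===== SOURCE A (Python) =====
-- from itertools import product
-- from typing import Iterable, Iterator, List, Optional
--
-- MAX_PATTERN_WILDCARDS = 4
--
-- def iter_expanded_pattern(pattern: str, words: Iterable[str], secondary_words: Iterable[str] | None = None) -> Iterator[str]:
--     first_words = list(words)
--     wildcard_count = pattern.count("*")
--     if wildcard_count < 1 or wildcard_count > MAX_PATTERN_WILDCARDS:
--         return
--
--     segments = pattern.split("*")
--     if wildcard_count == 1:
--         prefix, suffix = segments[0], segments[1]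
--         for first in first_words:
--             yield f"{prefix}{first}{suffix}"
--         return
--
--     other_words = list(secondary_words) if secondary_words is not None else first_words
--     for first in first_words:
--         for rest in product(other_words, repeat=wildcard_count - 1):
--             pieces: List[str] = [segments[0], first]
--             for idx, token in enumerate(rest, start=1):
--                 pieces.append(segments[idx])
--                 pieces.append(token)
--             pieces.append(segments[wildcard_count])
--             yield "".join(pieces)
-- ===== SOURCE B (Python) =====
-- MAX_PATTERN_WILDCARDS = 4
--
--
-- def _expand(segments, pools):
--     """All interleavings segments[0] + w0 + segments[1] + w1 + ... built recursively."""
--     if not pools: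
--         return [segments[0]]
--     tails = _expand(segments[1:], pools[1:])
--     return [segments[0] + w + tail for w in pools[0] for tail in tails]
--
--
-- def iter_expanded_pattern(pattern, words, secondary_words=None):
--     wildcard_count = pattern.count("*")
--     if not 1 <= wildcard_count <= MAX_PATTERN_WILDCARDS:
--         return
--     segments = pattern.split("*")
--     first_words = list(words)
--     if wildcard_count == 1:
--         pools = [first_words]
--     else:
--         other_words = list(secondary_words) if secondary_words is not None else first_words
--         pools = [first_words] + [other_words] * (wildcard_count - 1)
--     yield from _expand(segments, pools)
-- ===== Notes on version B (the rewrite author's own statement) =====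
-- stated objective: simpler
-- what changed: Replaces the two separate yield branches, itertools.product and the per-tuple enumerate/index piece-list assembly with one uniform recursive expansion over a list of word pools that interleaves segments structurally and shares the computed tails across the outer words.
import Mathlib
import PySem

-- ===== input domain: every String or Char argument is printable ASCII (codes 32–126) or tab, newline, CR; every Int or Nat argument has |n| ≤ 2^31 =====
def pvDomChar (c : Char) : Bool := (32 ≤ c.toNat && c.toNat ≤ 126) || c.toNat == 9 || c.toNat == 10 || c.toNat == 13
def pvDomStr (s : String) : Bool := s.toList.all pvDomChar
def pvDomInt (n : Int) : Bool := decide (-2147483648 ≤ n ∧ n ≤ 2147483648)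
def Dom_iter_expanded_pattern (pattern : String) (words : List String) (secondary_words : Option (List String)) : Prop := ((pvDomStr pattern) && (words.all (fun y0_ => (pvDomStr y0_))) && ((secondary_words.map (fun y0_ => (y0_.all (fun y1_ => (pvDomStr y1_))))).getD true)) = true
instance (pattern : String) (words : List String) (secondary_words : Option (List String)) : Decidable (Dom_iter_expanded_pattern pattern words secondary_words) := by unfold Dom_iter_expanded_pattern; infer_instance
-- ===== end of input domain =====

-- B replaces the two yield branches, itertools.product and the per-tuple enumerate/index
-- piece assembly by one uniform recursive expansion over a list of word pools (simpler).
-- Both Pythons are generators; ports return the list of yielded values.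

-- ===== PORT A =====
-- itertools.product(pool, repeat=n), element tuples as lists, leftmost position varying
-- slowest — exact CPython order.
def pyProductRepeat (pool : List String) : Nat → List (List String)
  | 0 => [[]]
  | n+1 => pool.flatMap (fun x => (pyProductRepeat pool n).map (x :: ·))

def iter_expanded_pattern (pattern : String) (words : List String) (secondary_words : Option (List String)) : List String :=
  let first_words := words
  let wildcard_count := PySem.Str.count pattern "*"
  if wildcard_count < 1 ∨ 4 < wildcard_count then []
  else
    let segments := (PySem.Str.split? pattern "*").getD []
    if wildcard_count = 1 then
      -- segments[0] / segments[1] are always in range here, so .getD "" is never reached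
      first_words.foldl (fun out first =>
        out ++ [(PySem.List.pyGet? segments 0).getD "" ++ first
                 ++ (PySem.List.pyGet? segments 1).getD ""]) []
    else
      first_words.foldl (fun out first =>
        (pyProductRepeat (match secondary_words with
            | some sw => sw
            | none => first_words) (wildcard_count - 1)).foldl (fun out rest =>
          out ++ [PySem.Str.join ""
            (((PySem.List.enumerate rest 1).foldl
                (fun pieces it => pieces ++ [(PySem.List.pyGet? segments it.1).getD "", it.2])
                [(PySem.List.pyGet? segments 0).getD "", first])
              ++ [(PySem.List.pyGet? segments ((wildcard_count : Nat) : Int)).getD ""])]) out) []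

-- ===== PORT B =====
-- _expand from Source B; segments[0] / segments[1:] as headD "" / tail (the index is always in
-- range on reachable calls, so the default is never reached).
def pvExpand (segments : List String) (pools : List (List String)) : List String :=
  match pools with
  | [] => [segments.headD ""]
  | pool :: restPools =>
    pool.flatMap (fun w =>
      (pvExpand segments.tail restPools).map (fun tail => segments.headD "" ++ w ++ tail))

def iter_expanded_pattern_alt (pattern : String) (words : List String) (secondary_words : Option (List String)) : List String :=
  let wildcard_count := PySem.Str.count pattern "*"
  if 1 ≤ wildcard_count ∧ wildcard_count ≤ 4 then
    let segments := (PySem.Str.split? pattern "*").getD []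
    let pools :=
      if wildcard_count = 1 then [words]
      else words :: List.replicate (wildcard_count - 1)
             (match secondary_words with
              | some sw => sw
              | none => words)
    pvExpand segments pools
  else []

-- ===== PRECONDITION & SPEC =====
def Spec_iter_expanded_pattern (pattern : String) (words : List String) (secondary_words : Option (List String)) (out : List String) : Prop := out = iter_expanded_pattern_alt pattern words secondary_words
instance (pattern : String) (words : List String) (secondary_words : Option (List String)) (out : List String) : Decidable (Spec_iter_expanded_pattern pattern words secondary_words out) := by unfold Spec_iter_expanded_pattern; infer_instance

-- ===== CLAIM (what is proved, stated in full; the proofs are below) =====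
def Claim_equal_iter_expanded_pattern : Prop := ∀ (pattern : String) (words : List String) (secondary_words : Option (List String)), Dom_iter_expanded_pattern pattern words secondary_words → Spec_iter_expanded_pattern pattern words secondary_words (iter_expanded_pattern pattern words secondary_words)

-- ===== LEMMAS AND PROOFS =====

theorem pvJoin_empty_nil : PySem.Str.join "" [] = "" := rfl

theorem pvJoin_empty_cons (x : String) (xs : List String) :
    PySem.Str.join "" (x :: xs) = x ++ PySem.Str.join "" xs := by
  apply String.toList_inj.mp
  simp only [PySem.Str.toList_join, PySem.Chars.join, List.intercalate, List.map_cons,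
    String.toList_append]
  cases xs with
  | nil => simp
  | cons y ys => simp [List.intersperse_cons₂]

theorem pvPyGet?_one {α : Type} (xs : List α) : PySem.List.pyGet? xs 1 = xs[1]? := by
  have h := PySem.List.pyGet?_natCast xs 1
  simpa using h

-- the strings A yields, characterised structurally
def pvInterleave : List String → List String → String
  | ss, [] => ss.headD ""
  | ss, t :: ts => ss.headD "" ++ t ++ pvInterleave ss.tail ts

theorem pvLength_mem_pyProductRepeat (pool : List String) (n : Nat) (rest : List String)
    (h : rest ∈ pyProductRepeat pool n) : rest.length = n := by
  induction n generalizing rest with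
  | zero => simp [pyProductRepeat] at h; simp [h]
  | succ n ih =>
    simp only [pyProductRepeat, List.mem_flatMap, List.mem_map] at h
    obtain ⟨x, -, r, hr, rfl⟩ := h
    simp [ih r hr]

theorem pvExpand_replicate (pool : List String) (n : Nat) (ss : List String) :
    pvExpand ss (List.replicate n pool) = (pyProductRepeat pool n).map (pvInterleave ss) := by
  induction n generalizing ss with
  | zero => simp [pvExpand, pyProductRepeat, pvInterleave]
  | succ n ih =>
    simp only [List.replicate_succ, pvExpand, pyProductRepeat, ih, List.map_flatMap,
      List.map_map]
    apply List.flatMap_congr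
    intro x _
    apply List.map_congr_left
    intro r _
    simp [Function.comp, pvInterleave]

theorem pvJoin_interleave (ts ss : List String) (j : Nat) :
    PySem.Str.join "" ((PySem.List.enumerate ts (j : Int)).flatMap
        (fun it => [(PySem.List.pyGet? ss it.1).getD "", it.2])
      ++ [(PySem.List.pyGet? ss ((j : Int) + ts.length)).getD ""])
    = pvInterleave (ss.drop j) ts := by
  induction ts generalizing j with
  | nil =>
    simp [PySem.List.enumerate_nil, pvJoin_empty_cons, pvJoin_empty_nil, pvInterleave,
      List.headD_eq_head?_getD, List.head?_drop, String.append_empty]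
  | cons t ts ih =>
    rw [PySem.List.enumerate_cons, List.flatMap_cons]
    have hidx : (j : Int) + ((t :: ts).length : Int) = ((j + 1 : Nat) : Int) + (ts.length : Int) := by
      simp only [List.length_cons]; push_cast; ring
    have hj1 : (j : Int) + 1 = ((j + 1 : Nat) : Int) := by push_cast; ring
    rw [hidx, hj1]
    simp only [List.cons_append, List.nil_append, pvJoin_empty_cons]
    rw [ih (j + 1)]
    simp [pvInterleave, List.headD_eq_head?_getD, List.head?_drop, List.tail_drop,
      String.append_assoc]

-- ===== VERDICT (by name: the statement is the Claim_ definition above) =====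
theorem iter_expanded_pattern_spec : Claim_equal_iter_expanded_pattern := by
  intro pattern words secondary_words _
  unfold Spec_iter_expanded_pattern
  simp only [iter_expanded_pattern, iter_expanded_pattern_alt]
  set k := PySem.Str.count pattern "*" with hk
  set segs := (PySem.Str.split? pattern "*").getD [] with hsegs
  by_cases hguard : k < 1 ∨ 4 < k
  · rw [if_pos hguard, if_neg (show ¬ (1 ≤ k ∧ k ≤ 4) by omega)]
  · rw [if_neg hguard, if_pos (show 1 ≤ k ∧ k ≤ 4 by omega)]
    by_cases h1 : k = 1
    · rw [if_pos h1, if_pos h1]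
      rw [PySem.List.foldl_append_singleton_eq_map]
      simp [pvExpand, pvPyGet?_one, PySem.List.pyGet?_zero,
        List.headD_eq_head?_getD, List.head?_eq_getElem?,
        ← List.map_eq_flatMap]
    · rw [if_neg h1, if_neg h1]
      simp only [PySem.List.foldl_append_singleton_eq_map, PySem.List.foldl_append_eq_flatMap,
        List.nil_append, pvExpand, pvExpand_replicate, List.map_map]
      apply List.flatMap_congr
      intro first _
      apply List.map_congr_left
      intro rest hrest
      have hlen : rest.length = k - 1 :=
        pvLength_mem_pyProductRepeat _ (k - 1) rest hrest
      have hcast : ((k : Nat) : Int) = (1 : Int) + (rest.length : Int) := by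
        rw [hlen]; omega
      have hK := pvJoin_interleave rest segs 1
      norm_num at hK
      rw [hcast]
      simp only [List.cons_append, List.nil_append, pvJoin_empty_cons]
      rw [hK]
      simp [Function.comp, PySem.List.pyGet?_zero, List.headD_eq_head?_getD,
        List.head?_eq_getElem?, String.append_assoc]
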